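-- pv_equiv track=rewrite | github.com/ethnjs/lambot | cogs/onboarding.py | _roles_from_row
-- ===== SOURCE A (Python) =====
-- def _roles_from_row(row: dict) -> list[str]:
--     """Extract the full ordered list of roles to assign from a sheet row."""
--     roles: list[str] = []
--
--     master = str(row.get("Master Role", "")).strip()
--     if master:
--         roles.append(master)
--
--     for r in str(row.get("Roles", "")).split(";"):
--         r = r.strip()
--         if r and r not in roles:
--             roles.append(r)
--
--     secondary = str(row.get("Secondary Role", "")).strip()
--     if secondary and secondary not in roles:
--         roles.append(secondary)
--
--     chapter = str(row.get("Chapter", "")).strip()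
--     if chapter and chapter.lower() not in ("n/a", "na", ""):
--         if chapter not in roles:
--             roles.append(chapter)
--     else:
--         if "Unaffiliated" not in roles:
--             roles.append("Unaffiliated")
--
--     return roles
-- ===== SOURCE B (Python) =====
-- def _roles_from_row(row: dict) -> list[str]:
--     """Extract the full ordered list of roles to assign from a sheet row."""
--     master = str(row.get("Master Role", "")).strip()
--     secondary = str(row.get("Secondary Role", "")).strip()
--     chapter = str(row.get("Chapter", "")).strip()
--     chapter_value = chapter if chapter.lower() not in ("n/a", "na", "") else "Unaffiliated"
--
--     candidates = []
--     if master: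
--         candidates.append(master)
--     candidates.extend(t for t in (p.strip() for p in str(row.get("Roles", "")).split(";")) if t)
--     if secondary:
--         candidates.append(secondary)
--     candidates.append(chapter_value)
--
--     seen = set()
--     result = []
--     for c in candidates:
--         if c not in seen:
--             seen.add(c)
--             result.append(c)
--     return result
-- ===== Notes on version B (the rewrite author's own statement) =====
-- stated objective: idiomatic
-- what changed: Replaces the interleaved append-if-not-already-present control flow with a two-pass gather-then-dedup structure: first build one flat candidate list (master, nonempty stripped tokens, secondary, computed chapter value), then keep first occurrences with a seen-set in a single dedup pass.
import Mathlib
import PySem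

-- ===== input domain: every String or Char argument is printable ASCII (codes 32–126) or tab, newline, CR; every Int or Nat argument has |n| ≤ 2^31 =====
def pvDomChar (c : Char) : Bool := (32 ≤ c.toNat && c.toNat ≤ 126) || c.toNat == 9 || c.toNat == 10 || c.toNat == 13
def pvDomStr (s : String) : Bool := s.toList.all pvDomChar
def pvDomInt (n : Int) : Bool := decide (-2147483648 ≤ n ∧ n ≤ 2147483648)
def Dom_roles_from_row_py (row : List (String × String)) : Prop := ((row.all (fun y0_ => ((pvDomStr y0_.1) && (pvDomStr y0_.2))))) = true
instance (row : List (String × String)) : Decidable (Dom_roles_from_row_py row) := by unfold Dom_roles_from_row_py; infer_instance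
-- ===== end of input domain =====

-- B gathers all candidates first and then keeps first occurrences in one dedup pass;
-- objective: idiomatic (same result, plainer two-pass structure).

-- shared input accessor: row.get(k, "") on the dict argument
def rowGet (row : List (String × String)) (k : String) : String :=
  PySem.Dict.getD (PySem.Dict.mk row) k ""

-- s.split(";"): the separator is the non-empty literal ";", so split? is always `some`
def splitSemi (s : String) : List String := (PySem.Str.split? s ";").getD []

-- ===== PORT A =====
def rolesStepA (roles : List String) (r0 : String) : List String :=
  let r := PySem.Str.strip r0
  if r ≠ "" ∧ r ∉ roles then roles ++ [r] else roles

def roles_from_row_py (row : List (String × String)) : List String :=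
  let roles : List String := []
  let master := PySem.Str.strip (rowGet row "Master Role")
  let roles := if master ≠ "" then roles ++ [master] else roles
  let roles := (splitSemi (rowGet row "Roles")).foldl rolesStepA roles
  let secondary := PySem.Str.strip (rowGet row "Secondary Role")
  let roles := if secondary ≠ "" ∧ secondary ∉ roles then roles ++ [secondary] else roles
  let chapter := PySem.Str.strip (rowGet row "Chapter")
  if chapter ≠ "" ∧ PySem.Str.lower chapter ∉ (["n/a", "na", ""] : List String) then
    if chapter ∉ roles then roles ++ [chapter] else roles
  else
    if "Unaffiliated" ∉ roles then roles ++ ["Unaffiliated"] else roles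

-- ===== PORT B =====
def candidates_B (row : List (String × String)) : List String :=
  let master := PySem.Str.strip (rowGet row "Master Role")
  let secondary := PySem.Str.strip (rowGet row "Secondary Role")
  let chapter := PySem.Str.strip (rowGet row "Chapter")
  let chapterValue :=
    if PySem.Str.lower chapter ∉ (["n/a", "na", ""] : List String) then chapter
    else "Unaffiliated"
  (if master ≠ "" then [master] else []) ++
    (((splitSemi (rowGet row "Roles")).map PySem.Str.strip).filter (· ≠ "")) ++
    (if secondary ≠ "" then [secondary] else []) ++ [chapterValue]

def dedupGo (seen : PySem.Set String) (acc : List String) : List String → List String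
  | [] => acc
  | c :: cs =>
    if PySem.Set.contains seen c then dedupGo seen acc cs
    else dedupGo (PySem.Set.add seen c) (acc ++ [c]) cs

def roles_from_row_py_alt (row : List (String × String)) : List String :=
  dedupGo PySem.Set.empty [] (candidates_B row)

-- ===== PRECONDITION & SPEC =====
def Spec_roles_from_row_py (row : List (String × String)) (out : List String) : Prop := out = roles_from_row_py_alt row
instance (row : List (String × String)) (out : List String) : Decidable (Spec_roles_from_row_py row out) := by unfold Spec_roles_from_row_py; infer_instance

-- ===== CLAIM (what is proved, stated in full; the proofs are below) =====
def Claim_equal_roles_from_row_py : Prop := ∀ (row : List (String × String)), Dom_roles_from_row_py row → Spec_roles_from_row_py row (roles_from_row_py row)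

-- ===== LEMMAS AND PROOFS =====

-- "append if not already present", the step both sides reduce to
def addIfNew (acc : List String) (x : String) : List String :=
  if x ∈ acc then acc else acc ++ [x]

lemma dedupGo_eq (l : List String) : ∀ (seen : PySem.Set String) (acc : List String),
    (∀ x, PySem.Set.contains seen x = acc.contains x) →
    dedupGo seen acc l = l.foldl addIfNew acc := by
  induction l with
  | nil => intro seen acc _; rfl
  | cons c cs ih =>
    intro seen acc h
    have hmem : ∀ y, (y ∈ seen) ↔ y ∈ acc := by
      intro y
      have := h y; simp [PySem.Set.contains, List.contains_eq_mem] at this; exact this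
    simp only [dedupGo, List.foldl_cons, addIfNew, PySem.Set.contains, List.contains_eq_mem]
    by_cases hc : c ∈ acc
    · rw [if_pos (by simp [hmem c, hc]), if_pos hc]
      exact ih seen acc h
    · rw [if_neg (by simp [hmem c, hc]), if_neg hc]
      apply ih
      intro x
      simp [PySem.Set.add, PySem.Set.contains, List.contains_eq_mem, hmem, hc, List.mem_append]

lemma foldl_stepA_eq (l : List String) : ∀ (acc : List String),
    l.foldl rolesStepA acc = ((l.map PySem.Str.strip).filter (· ≠ "")).foldl addIfNew acc := by
  induction l with
  | nil => intro acc; rfl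
  | cons r0 rs ih =>
    intro acc
    simp only [List.foldl_cons, List.map_cons, rolesStepA]
    by_cases he : PySem.Str.strip r0 = ""
    · simp [he, ih]
    · by_cases hm : PySem.Str.strip r0 ∈ acc
      · simp [he, hm, ih, addIfNew]
      · simp [he, hm, ih, addIfNew]

lemma lower_empty : PySem.Str.lower "" = "" := by decide

-- ===== VERDICT (by name: the statement is the Claim_ definition above) =====
theorem roles_from_row_py_spec : Claim_equal_roles_from_row_py := by
  intro row _
  unfold Spec_roles_from_row_py roles_from_row_py roles_from_row_py_alt candidates_B
  rw [dedupGo_eq _ _ _ (by intro x; rfl)]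
  simp only [List.foldl_append, foldl_stepA_eq]
  generalize ((splitSemi (rowGet row "Roles")).map PySem.Str.strip).filter (· ≠ "") = toks
  generalize PySem.Str.strip (rowGet row "Master Role") = master
  generalize PySem.Str.strip (rowGet row "Secondary Role") = secondary
  generalize PySem.Str.strip (rowGet row "Chapter") = chapter
  have h1 : (if master ≠ "" then [master] else []).foldl addIfNew [] =
      if master ≠ "" then ([] : List String) ++ [master] else [] := by
    by_cases h : master = "" <;> simp [h, addIfNew]
  rw [h1]
  set mid := toks.foldl addIfNew (if master ≠ "" then ([] : List String) ++ [master] else []) with hmid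
  have h2 : (if secondary ≠ "" then [secondary] else []).foldl addIfNew mid =
      if secondary ≠ "" ∧ secondary ∉ mid then mid ++ [secondary] else mid := by
    by_cases h : secondary = ""
    · simp [h]
    · by_cases hm : secondary ∈ mid <;> simp [h, hm, addIfNew]
  rw [h2]
  set mid2 := if secondary ≠ "" ∧ secondary ∉ mid then mid ++ [secondary] else mid
  simp only [List.foldl_cons, List.foldl_nil]
  by_cases hch : PySem.Str.lower chapter ∈ (["n/a", "na", ""] : List String)
  · have hd := hch
    simp only [List.mem_cons, List.not_mem_nil, or_false] at hd
    have hna : ¬ (chapter ≠ "" ∧ PySem.Str.lower chapter ∉ (["n/a", "na", ""] : List String)) :=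
      fun hp => hp.2 hch
    rw [if_neg hna]
    rcases hd with h | h | h <;> rw [h] <;>
      by_cases hu : "Unaffiliated" ∈ mid2 <;> simp [hu, addIfNew]
  · have hd := hch
    simp only [List.mem_cons, List.not_mem_nil, or_false, not_or] at hd
    have hne : chapter ≠ "" := by
      intro h; rw [h, lower_empty] at hch; simp at hch
    rw [if_pos ⟨hne, hch⟩, if_pos hch]
    by_cases hc2 : chapter ∈ mid2 <;> simp [hc2, addIfNew]
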